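-- pv_equiv track=rewrite | github.com/dwsmith1983/spark-bestfit | scripts/mutmut_parallel.py | parse_mutation_diff
-- ===== SOURCE A (Python) =====
-- from typing import Optional
--
-- def parse_mutation_diff(diff: str) -> tuple[Optional[str], Optional[str]]:
--     """Extract the before/after from a mutation diff."""
--     lines = diff.split("\n")
--     before = None
--     after = None
--
--     for line in lines:
--         if line.startswith("-") and not line.startswith("---"):
--             before = line[1:].strip()
--         elif line.startswith("+") and not line.startswith("+++"):
--             after = line[1:].strip()
--
--     return before, after
-- ===== SOURCE B (Python) =====
-- from typing import Optional
--
-- def parse_mutation_diff(diff: str) -> tuple[Optional[str], Optional[str]]: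
--     """Extract the before/after from a mutation diff."""
--     lines = diff.split("\n")
--     before = next((line[1:].strip() for line in reversed(lines)
--                    if line.startswith("-") and not line.startswith("---")), None)
--     after = next((line[1:].strip() for line in reversed(lines)
--                   if line.startswith("+") and not line.startswith("+++")), None)
--     return before, after
-- ===== Notes on version B (the rewrite author's own statement) =====
-- stated objective: alternative
-- what changed: Replaces the single forward loop that keeps overwriting two accumulators with two independent reverse searches (first match in reversed(lines)) for the before and after lines.
import Mathlib
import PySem

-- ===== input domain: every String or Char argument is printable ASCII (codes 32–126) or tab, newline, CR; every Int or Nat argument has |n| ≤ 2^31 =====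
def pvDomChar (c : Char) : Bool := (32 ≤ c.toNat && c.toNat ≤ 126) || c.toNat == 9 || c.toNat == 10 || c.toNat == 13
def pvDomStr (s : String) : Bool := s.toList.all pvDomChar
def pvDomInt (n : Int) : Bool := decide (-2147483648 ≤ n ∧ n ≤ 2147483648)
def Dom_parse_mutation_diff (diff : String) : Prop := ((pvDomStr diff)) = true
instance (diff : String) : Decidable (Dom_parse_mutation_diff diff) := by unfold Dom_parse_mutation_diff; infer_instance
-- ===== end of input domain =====

-- B replaces A's single forward accumulating loop with two independent reverse searches (same O(n) cost; objective: alternative decomposition).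


-- ===== PORT A =====
-- shared helpers: the line tests and the value 'line[1:].strip()' (identical text in both Pythons)
def pvIsBefore (line : String) : Bool :=
  PySem.Str.startswith line "-" && !(PySem.Str.startswith line "---")

def pvIsAfter (line : String) : Bool :=
  PySem.Str.startswith line "+" && !(PySem.Str.startswith line "+++")

def pvVal (line : String) : String :=
  PySem.Str.strip (PySem.Str.slice line (some 1) none)

-- A's loop body: overwrite 'before' or 'after' (the elif chain, in order)
def pvStepA (st : Option String × Option String) (line : String) : Option String × Option String :=
  if pvIsBefore line then (some (pvVal line), st.2)
  else if pvIsAfter line then (st.1, some (pvVal line))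
  else st

def parse_mutation_diff (diff : String) : Option String × Option String :=
  let lines := (PySem.Str.split? diff "\n").getD []
  lines.foldl pvStepA (none, none)

-- ===== PORT B =====
def parse_mutation_diff_alt (diff : String) : Option String × Option String :=
  let lines := (PySem.Str.split? diff "\n").getD []
  ((lines.reverse.find? pvIsBefore).map pvVal,
   (lines.reverse.find? pvIsAfter).map pvVal)

-- ===== PRECONDITION & SPEC =====
def Spec_parse_mutation_diff (diff : String) (out : Option String × Option String) : Prop := out = parse_mutation_diff_alt diff
instance (diff : String) (out : Option String × Option String) : Decidable (Spec_parse_mutation_diff diff out) := by unfold Spec_parse_mutation_diff; infer_instance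

-- ===== CLAIM (what is proved, stated in full; the proofs are below) =====
def Claim_equal_parse_mutation_diff : Prop := ∀ (diff : String), Dom_parse_mutation_diff diff → Spec_parse_mutation_diff diff (parse_mutation_diff diff)

-- ===== LEMMAS AND PROOFS =====
-- merge a reverse-search result with the accumulator value the fold started from
def pvMerge (r : Option String) (d : Option String) : Option String :=
  match r with
  | some x => some (pvVal x)
  | none => d

-- a line cannot start with both "-" and "+": the two tests are mutually exclusive
theorem pv_before_after (x : String) (hb : pvIsBefore x = true) : pvIsAfter x = false := by
  by_contra h
  rw [Bool.not_eq_false] at h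
  unfold pvIsBefore at hb
  unfold pvIsAfter at h
  simp only [Bool.and_eq_true] at hb h
  obtain ⟨h1, -⟩ := hb
  obtain ⟨h2, -⟩ := h
  rw [PySem.Str.startswith_eq] at h1 h2
  obtain ⟨t, ht⟩ := (PySem.Chars.startswith_iff _ _).1 h1
  obtain ⟨u, hu⟩ := (PySem.Chars.startswith_iff _ _).1 h2
  rw [← ht] at hu
  simp [show "-".toList = ['-'] from rfl, show "+".toList = ['+'] from rfl] at hu

theorem pv_fold_eq_find (l : List String) : ∀ (s : Option String × Option String),
    l.foldl pvStepA s =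
      (pvMerge (l.reverse.find? pvIsBefore) s.1, pvMerge (l.reverse.find? pvIsAfter) s.2) := by
  induction l with
  | nil => intro s; simp [pvMerge]
  | cons x l ih =>
      intro s
      rw [List.foldl_cons, ih]
      have hrev : (x :: l).reverse = l.reverse ++ [x] := by simp
      rw [hrev, List.find?_append, List.find?_append]
      by_cases hb : pvIsBefore x
      · have ha := pv_before_after x hb
        cases l.reverse.find? pvIsBefore <;>
          cases l.reverse.find? pvIsAfter <;>
            simp [pvStepA, pvMerge, hb, ha, List.find?]
      · by_cases ha : pvIsAfter x <;>
          cases l.reverse.find? pvIsBefore <;>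
            cases l.reverse.find? pvIsAfter <;>
              simp [pvStepA, pvMerge, hb, ha, List.find?]

theorem parse_mutation_diff_eq (diff : String) :
    parse_mutation_diff diff = parse_mutation_diff_alt diff := by
  unfold parse_mutation_diff parse_mutation_diff_alt
  rw [pv_fold_eq_find]
  cases hB : ((PySem.Str.split? diff "\n").getD []).reverse.find? pvIsBefore <;>
    cases hA : ((PySem.Str.split? diff "\n").getD []).reverse.find? pvIsAfter <;>
      simp only [hB, hA] <;> rfl

-- ===== VERDICT (by name: the statement is the Claim_ definition above) =====
theorem parse_mutation_diff_spec : Claim_equal_parse_mutation_diff := by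
  intro diff _
  unfold Spec_parse_mutation_diff
  exact parse_mutation_diff_eq diff
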